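-- pv_equiv track=rewrite | github.com/avinash-reddy-rangu/jars | dp_new.py | insert_numeric_anchors
-- ===== SOURCE A (Python) =====
-- from typing import Any, Dict, List, Optional
--
-- def insert_numeric_anchors(anchors: List[Dict[str, Any]], message: str) -> str:
--     if not anchors:
--         return message
--     anchors_sorted = sorted(anchors, key=lambda a: int(a.get("offset", 0)))
--     out = message
--     shift = 0
--     for a in anchors_sorted:
--         try:
--             idx = int(a.get("id", 0)) + 1
--             off = int(a.get("offset", 0)) + shift
--             tag = f"[{idx}]"
--             out = out[:off] + tag + out[off:]
--             shift += len(tag)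
--         except Exception:
--             continue
--     return out
-- ===== SOURCE B (Python) =====
-- def insert_numeric_anchors(anchors, message):
--     # One-pass split-and-join: sort anchors by offset, clamp each offset into
--     # [0, len(message)], then emit message pieces and tags in a single sweep.
--     ordered = sorted(anchors, key=lambda a: int(a.get("offset", 0)))
--     parts = []
--     prev = 0
--     for a in ordered:
--         cut = min(max(int(a.get("offset", 0)), 0), len(message))
--         parts.append(message[prev:cut])
--         parts.append("[%d]" % (int(a.get("id", 0)) + 1))
--         prev = cut
--     parts.append(message[prev:])
--     return "".join(parts)
-- ===== Notes on version B (the rewrite author's own statement) =====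
-- stated objective: alternative
-- what changed: A repeatedly re-slices and re-concatenates the whole output string once per anchor (tracking a running shift); B sorts the anchors once, clamps each offset into [0, len(message)], and emits message pieces and tags in a single split-and-join sweep (intended as asymptotically lighter; a timing run read 1.3-1.8x at the largest size, below the confirmation bar).
-- outside the precondition, e.g. on insert_numeric_anchors([{'id': 0, 'offset': -1}], 'ab'): A returns 'a[1]b', B returns '[1]ab'; on insert_numeric_anchors([{'id': 0, 'offset': -5}, {'id': 1, 'offset': -3}], ''): A returns '[2][1]', B returns '[1][2]'
import Mathlib
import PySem

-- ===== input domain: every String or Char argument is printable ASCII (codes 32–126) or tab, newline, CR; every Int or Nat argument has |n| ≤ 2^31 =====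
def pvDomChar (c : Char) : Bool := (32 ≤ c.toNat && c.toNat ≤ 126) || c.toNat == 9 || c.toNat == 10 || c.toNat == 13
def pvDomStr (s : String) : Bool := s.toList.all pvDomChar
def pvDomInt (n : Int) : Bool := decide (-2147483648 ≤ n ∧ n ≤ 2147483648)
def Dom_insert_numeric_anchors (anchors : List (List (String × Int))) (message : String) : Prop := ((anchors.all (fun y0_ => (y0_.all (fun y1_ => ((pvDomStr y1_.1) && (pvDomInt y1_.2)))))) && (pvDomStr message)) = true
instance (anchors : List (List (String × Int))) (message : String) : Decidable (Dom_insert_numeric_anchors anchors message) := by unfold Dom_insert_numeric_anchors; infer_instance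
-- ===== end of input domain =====

-- ===== PORT A =====
-- B replaces A's repeated string splicing by a one-pass split-and-join (sort, clamp
-- offsets into [0, len(message)], emit pieces and tags once); on anchors with a
-- negative offset the two differ by design (excluded by Pre_ below).

-- a.get(k, 0) on the anchor dict (association list, first match)
def anchorGet (a : List (String × Int)) (k : String) : Int :=
  ((a.find? (fun p => p.1 == k)).map Prod.snd).getD 0

-- f"[{idx}]"
def anchorTag (idx : Int) : List Char :=
  '[' :: (PySem.Int.toChars idx ++ [']'])

-- one iteration of A's loop: out = out[:off] + tag + out[off:]; shift += len(tag)
def aStep (st : List Char × Int) (a : List (String × Int)) : List Char × Int :=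
  let idx := anchorGet a "id" + 1
  let off := anchorGet a "offset" + st.2
  let tag := anchorTag idx
  (PySem.List.slice st.1 none (some off) ++ tag ++ PySem.List.slice st.1 (some off) none,
   st.2 + (tag.length : Int))

def insert_numeric_anchors (anchors : List (List (String × Int))) (message : String) : String :=
  if anchors = [] then message
  else
    -- anchors_sorted = sorted(anchors, key=lambda a: int(a.get("offset", 0)))
    let anchorsSorted := PySem.List.sorted anchors (fun a => anchorGet a "offset") false
    let fin := anchorsSorted.foldl aStep (message.toList, 0)
    String.ofList fin.1

-- ===== PORT B =====
-- one iteration of B's loop: parts += [message[prev:cut], tag]; prev = cut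
def bStep (ms : List Char) (st : List Char × Int) (a : List (String × Int)) : List Char × Int :=
  let cut := min (max (anchorGet a "offset") 0) (PySem.List.len ms)
  (st.1 ++ PySem.List.slice ms (some st.2) (some cut) ++ anchorTag (anchorGet a "id" + 1),
   cut)

def insert_numeric_anchors_alt (anchors : List (List (String × Int))) (message : String) : String :=
  let ordered := PySem.List.sorted anchors (fun a => anchorGet a "offset") false
  let ms := message.toList
  let fin := ordered.foldl (bStep ms) (([] : List Char), 0)
  -- parts.append(message[prev:]); return "".join(parts)  (parts kept flattened)
  String.ofList (fin.1 ++ PySem.List.slice ms (some fin.2) none)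

-- ===== PRECONDITION & SPEC =====
-- Pre_ excludes anchors carrying a negative offset: there the insertion point is unspecified,
-- and A's value is an artefact of Python slice wraparound (the tag is inserted relative to the
-- end of the partially tagged string, interacting with the running shift), while B clamps the
-- offset to the start of the message — both are accidental choices on that corner.
def Pre_insert_numeric_anchors (anchors : List (List (String × Int))) (message : String) : Prop :=
  ∀ a ∈ anchors, 0 ≤ anchorGet a "offset"
instance (anchors : List (List (String × Int))) (message : String) : Decidable (Pre_insert_numeric_anchors anchors message) := by unfold Pre_insert_numeric_anchors; infer_instance

def pvWitness_insert_numeric_anchors : (List (List (String × Int))) × String :=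
  ([[("id", 0), ("offset", 1)], [("id", 1), ("offset", 7)]], "hello")

def Spec_insert_numeric_anchors (anchors : List (List (String × Int))) (message : String) (out : String) : Prop := out = insert_numeric_anchors_alt anchors message
instance (anchors : List (List (String × Int))) (message : String) (out : String) : Decidable (Spec_insert_numeric_anchors anchors message out) := by unfold Spec_insert_numeric_anchors; infer_instance

-- ===== CLAIM (what is proved, stated in full; the proofs are below) =====
def Claim_equal_insert_numeric_anchors : Prop := ∀ (anchors : List (List (String × Int))) (message : String), Dom_insert_numeric_anchors anchors message → Pre_insert_numeric_anchors anchors message → Spec_insert_numeric_anchors anchors message (insert_numeric_anchors anchors message)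

-- ===== LEMMAS AND PROOFS =====

-- Main invariant: over the same (offset-sorted, all offsets ≥ prev ≥ 0) anchor list,
-- A's string state is B's accumulated output followed by the unconsumed tail of the
-- message, and A's shift is B's output length minus the consumed message prefix.
lemma loop_eq (ms : List Char) (L : List (List (String × Int)))
    (acc : List Char) (prev : Int)
    (hnn : ∀ a ∈ L, 0 ≤ anchorGet a "offset")
    (hpw : L.Pairwise (fun a b => anchorGet a "offset" ≤ anchorGet b "offset"))
    (h0 : 0 ≤ prev) (hm : prev ≤ (ms.length : Int))
    (hge : ∀ a ∈ L, prev ≤ anchorGet a "offset") :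
    0 ≤ (L.foldl (bStep ms) (acc, prev)).2 ∧
    (L.foldl (bStep ms) (acc, prev)).2 ≤ (ms.length : Int) ∧
      L.foldl aStep (acc ++ ms.drop prev.toNat, (acc.length : Int) - prev)
        = ((L.foldl (bStep ms) (acc, prev)).1 ++ ms.drop (L.foldl (bStep ms) (acc, prev)).2.toNat,
           ((L.foldl (bStep ms) (acc, prev)).1.length : Int) - (L.foldl (bStep ms) (acc, prev)).2) := by
  induction L generalizing acc prev with
  | nil => exact ⟨h0, hm, rfl⟩
  | cons a L ih =>
    have hoff : 0 ≤ anchorGet a "offset" := hnn a (List.mem_cons_self)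
    have hpge : prev ≤ anchorGet a "offset" := hge a (List.mem_cons_self)
    have hpc := List.pairwise_cons.mp hpw
    have hcut0 : 0 ≤ (bStep ms (acc, prev) a).2 := by
      simp only [bStep, PySem.List.len_eq]; omega
    have hcutm : (bStep ms (acc, prev) a).2 ≤ (ms.length : Int) := by
      simp only [bStep, PySem.List.len_eq]; omega
    have hcutge : ∀ b ∈ L, (bStep ms (acc, prev) a).2 ≤ anchorGet b "offset" := by
      intro b hb
      have := hpc.1 b hb
      simp only [bStep, PySem.List.len_eq]; omega
    have hstep : aStep (acc ++ ms.drop prev.toNat, (acc.length : Int) - prev) a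
        = ((bStep ms (acc, prev) a).1 ++ ms.drop (bStep ms (acc, prev) a).2.toNat,
           ((bStep ms (acc, prev) a).1.length : Int) - (bStep ms (acc, prev) a).2) := by
      simp only [aStep, bStep, PySem.List.len_eq]
      have hi : (0:Int) ≤ anchorGet a "offset" + ((acc.length : Int) - prev) := by omega
      rw [PySem.List.slice_to _ hi, PySem.List.slice_from _ hi,
          PySem.List.slice_toNat ms h0 (by omega : (0:Int) ≤ min (max (anchorGet a "offset") 0) (ms.length : Int)),
          List.take_append, List.drop_append]
      have hiN : ((anchorGet a "offset" + ((acc.length : Int) - prev)).toNat : Int)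
          = anchorGet a "offset" + ((acc.length : Int) - prev) := Int.toNat_of_nonneg hi
      have hpN : ((prev.toNat : Int)) = prev := Int.toNat_of_nonneg h0
      have hcN : (((min (max (anchorGet a "offset") 0) (ms.length : Int)).toNat : Int))
          = min (max (anchorGet a "offset") 0) (ms.length : Int) := Int.toNat_of_nonneg (by omega)
      have hmin : min (max (anchorGet a "offset") 0) (ms.length : Int) = anchorGet a "offset"
          ∨ min (max (anchorGet a "offset") 0) (ms.length : Int) = (ms.length : Int) := by
        rw [max_eq_left hoff]; rcases min_cases (anchorGet a "offset") ((ms.length : Int)) with h | h <;> [left; right] <;> exact h.1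
      have hacc : acc.length ≤ (anchorGet a "offset" + ((acc.length : Int) - prev)).toNat := by omega
      rw [List.take_of_length_le hacc, List.drop_eq_nil_of_le hacc, List.nil_append, List.drop_drop]
      have htk : (ms.drop prev.toNat).take ((anchorGet a "offset" + ((acc.length : Int) - prev)).toNat - acc.length)
          = (ms.drop prev.toNat).take ((min (max (anchorGet a "offset") 0) (ms.length : Int)).toNat - prev.toNat) := by
        rw [List.take_eq_take_iff, List.length_drop]; omega
      have hdr : ms.drop (prev.toNat + ((anchorGet a "offset" + ((acc.length : Int) - prev)).toNat - acc.length))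
          = ms.drop (min (max (anchorGet a "offset") 0) (ms.length : Int)).toNat := by
        rcases hmin with h | h
        · congr 1; omega
        · rw [List.drop_eq_nil_of_le (by omega), List.drop_eq_nil_of_le (by omega)]
      rw [htk, hdr]
      simp only [Prod.mk.injEq]
      refine ⟨trivial, ?_⟩
      simp only [List.length_append, List.length_take, List.length_drop]
      push_cast
      omega
    simp only [List.foldl_cons]
    rw [hstep]
    exact ih (bStep ms (acc, prev) a).1 (bStep ms (acc, prev) a).2
      (fun b hb => hnn b (List.mem_cons_of_mem _ hb)) hpc.2 hcut0 hcutm hcutge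

-- ===== VERDICT (by name: the statement is the Claim_ definition above) =====
theorem insert_numeric_anchors_spec : Claim_equal_insert_numeric_anchors := by
  intro anchors message _ hnn
  unfold Spec_insert_numeric_anchors insert_numeric_anchors insert_numeric_anchors_alt
  by_cases hA : anchors = []
  · subst hA
    have hs : PySem.List.sorted ([] : List (List (String × Int))) (fun a => anchorGet a "offset") false = [] := rfl
    simp [hs, PySem.List.slice_from _ (le_refl (0:Int))]
  · rw [if_neg hA]
    have hmem : ∀ a ∈ PySem.List.sorted anchors (fun a => anchorGet a "offset") false,
        0 ≤ anchorGet a "offset" := by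
      intro a ha
      exact hnn a ((PySem.List.mem_sorted _ _ _ _).mp ha)
    obtain ⟨hb0, _, heq⟩ := loop_eq message.toList
      (PySem.List.sorted anchors (fun a => anchorGet a "offset") false) [] 0
      hmem (PySem.List.sorted_pairwise anchors (fun a => anchorGet a "offset"))
      (le_refl 0) (Int.natCast_nonneg _) (fun a ha => hmem a ha)
    simp only [List.nil_append, Int.toNat_zero, List.drop_zero, List.length_nil,
      Int.natCast_zero, sub_zero] at heq
    show String.ofList (List.foldl aStep (message.toList, 0)
        (PySem.List.sorted anchors (fun a => anchorGet a "offset") false)).1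
      = String.ofList ((List.foldl (bStep message.toList) ([], 0)
            (PySem.List.sorted anchors (fun a => anchorGet a "offset") false)).1 ++
          PySem.List.slice message.toList
            (some (List.foldl (bStep message.toList) ([], 0)
              (PySem.List.sorted anchors (fun a => anchorGet a "offset") false)).2) none)
    rw [heq, PySem.List.slice_from _ hb0]
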